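-- pv_equiv track=rewrite | github.com/m-c-hill/grokking-algorithms | chapters/ch18_islands.py | get_island_traversal_path
-- ===== SOURCE A (Python) =====
-- from typing import List, Tuple
--
-- def get_island_traversal_path(
--     matrix: List[List[int]], visited: List[List[int]], i: int, j: int, direction: int
-- ) -> str:
--     rows = len(matrix)
--     cols = len(matrix[0])
--
--     if i < 0 or i >= rows or j < 0 or j >= cols:
--         return ""
--
--     if matrix[i][j] == 0 or visited[i][j]:
--         return ""
--
--     visited[i][j] = True
--
--     return (
--         direction
--         + get_island_traversal_path(matrix, visited, i + 1, j, "D")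
--         + get_island_traversal_path(matrix, visited, i - 1, j, "U")
--         + get_island_traversal_path(matrix, visited, i, j - 1, "L")
--         + get_island_traversal_path(matrix, visited, i, j + 1, "R")
--     )
-- ===== SOURCE B (Python) =====
-- def get_island_traversal_path(matrix, visited, i, j, direction):
--     rows = len(matrix)
--     cols = len(matrix[0])
--     out = []
--     stack = [(i, j, direction)]
--     while stack:
--         ci, cj, d = stack.pop()
--         if ci < 0 or ci >= rows or cj < 0 or cj >= cols:
--             continue
--         if matrix[ci][cj] == 0 or visited[ci][cj]:
--             continue
--         visited[ci][cj] = True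
--         out.append(d)
--         stack.append((ci, cj + 1, "R"))
--         stack.append((ci, cj - 1, "L"))
--         stack.append((ci - 1, cj, "U"))
--         stack.append((ci + 1, cj, "D"))
--     return "".join(out)
-- ===== Notes on version B (the rewrite author's own statement) =====
-- stated objective: alternative
-- what changed: Replaces the 4-way recursive DFS with an iterative DFS over an explicit stack (neighbours pushed in reverse order, visited checked at pop time) that appends direction labels to a list and joins them once at the end.
-- outside the precondition, e.g. on get_island_traversal_path([[1, 1]], [[0, 0], [7]], 0, 0, 'S'): A returns 'SR', B returns 'SR'; on get_island_traversal_path([[1, 1]], [[0, 2]], 0, 0, 'S'): A returns 'S', B returns 'S'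
import Mathlib
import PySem

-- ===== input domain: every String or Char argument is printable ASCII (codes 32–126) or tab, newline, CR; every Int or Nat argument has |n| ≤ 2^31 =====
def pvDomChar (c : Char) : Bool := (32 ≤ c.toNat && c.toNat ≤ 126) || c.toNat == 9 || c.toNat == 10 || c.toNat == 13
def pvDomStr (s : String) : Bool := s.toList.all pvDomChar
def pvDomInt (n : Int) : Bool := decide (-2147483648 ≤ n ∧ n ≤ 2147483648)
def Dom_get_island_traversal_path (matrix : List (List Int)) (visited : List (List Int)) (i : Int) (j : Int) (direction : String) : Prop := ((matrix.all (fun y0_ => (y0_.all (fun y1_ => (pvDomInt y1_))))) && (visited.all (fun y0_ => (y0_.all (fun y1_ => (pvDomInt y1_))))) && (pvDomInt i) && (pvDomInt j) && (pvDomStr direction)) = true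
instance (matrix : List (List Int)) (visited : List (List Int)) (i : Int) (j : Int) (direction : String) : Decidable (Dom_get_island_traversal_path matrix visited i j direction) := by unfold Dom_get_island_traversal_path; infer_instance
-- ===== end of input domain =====

-- ===== PORT A =====
-- B replaces A's 4-way recursive DFS by an iterative stack DFS collecting labels in a list
-- (joined once at the end); both mutate `visited` identically in Python — the claim is about
-- the return value only.
-- Shared low-level helpers (cell read, cell write, zero-count used as the fuel bound, join):
def getCell (v : List (List Int)) (i j : Int) : Int :=
  (PySem.List.pyGet? ((PySem.List.pyGet? v i).getD []) j).getD 0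

-- visited[i][j] = True  (True = 1 as an int; only its truthiness is ever read)
def setCell : List (List Int) → Nat → Nat → List (List Int)
  | [], _, _ => []
  | r :: rs, 0, j => r.set j 1 :: rs
  | r :: rs, Nat.succ i, j => r :: setCell rs i j

def cntRow (r : List Int) : Nat := r.countP (fun x => x == 0)
def cnt (v : List (List Int)) : Nat := (v.map cntRow).sum

def jn (l : List String) : String := l.foldl (· ++ ·) ""

-- literal port of A's recursion; the fuel (number of still-unvisited cells + 1) is only a
-- totality guard — Lemma aGo_suff shows it never runs out on inputs satisfying Pre_.
def aGo (matrix : List (List Int)) : Nat → List (List Int) → Int → Int → String → Option (String × List (List Int))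
  | 0, _, _, _, _ => none
  | Nat.succ f, visited, i, j, dir =>
    let rows : Int := matrix.length
    let cols : Int := (matrix.headI).length
    if i < 0 ∨ rows ≤ i ∨ j < 0 ∨ cols ≤ j then some ("", visited)
    else if getCell matrix i j = 0 ∨ getCell visited i j ≠ 0 then some ("", visited)
    else
      match aGo matrix f (setCell visited i.toNat j.toNat) (i+1) j "D" with
      | none => none
      | some (sD, v1) =>
        match aGo matrix f v1 (i-1) j "U" with
        | none => none
        | some (sU, v2) =>
          match aGo matrix f v2 i (j-1) "L" with
          | none => none
          | some (sL, v3) =>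
            match aGo matrix f v3 i (j+1) "R" with
            | none => none
            | some (sR, v4) => some (dir ++ sD ++ sU ++ sL ++ sR, v4)

def get_island_traversal_path (matrix : List (List Int)) (visited : List (List Int)) (i : Int) (j : Int) (direction : String) : String :=
  ((aGo matrix (cnt visited + 1) visited i j direction).getD ("", visited)).1

-- ===== PORT B =====
-- literal port of Source B's while-loop over an explicit stack (head of the list = top of the
-- stack; Python pushes R,L,U,D so D is on top); fuel 4*cnt+1 is again only a totality guard.
def bGo (matrix : List (List Int)) : Nat → List (List Int) → List (Int × Int × String) → List String → Option (List String × List (List Int))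
  | _, visited, [], acc => some (acc, visited)
  | 0, _, _ :: _, _ => none
  | Nat.succ f, visited, (ci, cj, d) :: rest, acc =>
    let rows : Int := matrix.length
    let cols : Int := (matrix.headI).length
    if ci < 0 ∨ rows ≤ ci ∨ cj < 0 ∨ cols ≤ cj then bGo matrix f visited rest acc
    else if getCell matrix ci cj = 0 ∨ getCell visited ci cj ≠ 0 then bGo matrix f visited rest acc
    else bGo matrix f (setCell visited ci.toNat cj.toNat)
           ((ci+1, cj, "D") :: (ci-1, cj, "U") :: (ci, cj-1, "L") :: (ci, cj+1, "R") :: rest)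
           (acc ++ [d])

def get_island_traversal_path_alt (matrix : List (List Int)) (visited : List (List Int)) (i : Int) (j : Int) (direction : String) : String :=
  jn (((bGo matrix (4 * cnt visited + 1) visited [(i, j, direction)] []).getD ([], visited)).1)

-- ===== PRECONDITION & SPEC =====
-- Pre_ excludes the empty matrix, on which A always raises IndexError at len(matrix[0]);
-- beyond that it admits any input on which the traversal provably stays inside the lists:
-- an out-of-bounds start, a start whose cell stops the DFS immediately, or a rectangular
-- matrix with a same-shaped visited mask.  The mask case keeps visited in the function's
-- natural domain of 0/1 flags (the flags this DFS itself writes); A also returns normally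
-- on some excluded inputs — ragged or non-boolean visited the traversal happens not to
-- touch — see cites.
def Pre_get_island_traversal_path (matrix : List (List Int)) (visited : List (List Int)) (i : Int) (j : Int) (direction : String) : Prop :=
  matrix ≠ [] ∧
  ( (i < 0 ∨ (matrix.length : Int) ≤ i ∨ j < 0 ∨ ((matrix.headI).length : Int) ≤ j)
  ∨ (0 ≤ i ∧ i < (matrix.length : Int) ∧ 0 ≤ j ∧ j < ((matrix.headI).length : Int) ∧
     j.toNat < (matrix.getD i.toNat []).length ∧
     ((matrix.getD i.toNat []).getD j.toNat 0 = 0 ∨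
      (i.toNat < visited.length ∧ j.toNat < (visited.getD i.toNat []).length ∧
       (visited.getD i.toNat []).getD j.toNat 0 ≠ 0)))
  ∨ ((∀ r ∈ matrix, r.length = (matrix.headI).length) ∧
     visited.length = matrix.length ∧ (∀ r ∈ visited, r.length = (matrix.headI).length) ∧
     (∀ r ∈ visited, ∀ x ∈ r, x = 0 ∨ x = 1)) )
instance (matrix : List (List Int)) (visited : List (List Int)) (i : Int) (j : Int) (direction : String) : Decidable (Pre_get_island_traversal_path matrix visited i j direction) := by unfold Pre_get_island_traversal_path; infer_instance

def pvWitness_get_island_traversal_path : List (List Int) × List (List Int) × Int × Int × String :=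
  ([[1, 1], [0, 1]], [[0, 0], [0, 0]], 0, 0, "S")

def Spec_get_island_traversal_path (matrix : List (List Int)) (visited : List (List Int)) (i : Int) (j : Int) (direction : String) (out : String) : Prop := out = get_island_traversal_path_alt matrix visited i j direction
instance (matrix : List (List Int)) (visited : List (List Int)) (i : Int) (j : Int) (direction : String) (out : String) : Decidable (Spec_get_island_traversal_path matrix visited i j direction out) := by unfold Spec_get_island_traversal_path; infer_instance

-- ===== CLAIM (what is proved, stated in full; the proofs are below) =====
def Claim_equal_get_island_traversal_path : Prop := ∀ (matrix : List (List Int)) (visited : List (List Int)) (i : Int) (j : Int) (direction : String), Dom_get_island_traversal_path matrix visited i j direction → Pre_get_island_traversal_path matrix visited i j direction → Spec_get_island_traversal_path matrix visited i j direction (get_island_traversal_path matrix visited i j direction)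

-- ===== LEMMAS AND PROOFS =====

theorem pvWitness_ok :
    Dom_get_island_traversal_path (pvWitness_get_island_traversal_path.1) (pvWitness_get_island_traversal_path.2.1) (pvWitness_get_island_traversal_path.2.2.1) (pvWitness_get_island_traversal_path.2.2.2.1) (pvWitness_get_island_traversal_path.2.2.2.2) ∧
    Pre_get_island_traversal_path (pvWitness_get_island_traversal_path.1) (pvWitness_get_island_traversal_path.2.1) (pvWitness_get_island_traversal_path.2.2.1) (pvWitness_get_island_traversal_path.2.2.2.1) (pvWitness_get_island_traversal_path.2.2.2.2) := by
  constructor <;> decide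

-- `visited` has exactly the shape of `matrix` (what Pre_ guarantees and the DFS preserves)
def Shape (matrix visited : List (List Int)) : Prop :=
  visited.length = matrix.length ∧ ∀ r ∈ visited, r.length = (matrix.headI).length

theorem getCell_nonneg (v : List (List Int)) (i j : Int) (hi : 0 ≤ i) (hj : 0 ≤ j) :
    getCell v i j = (v.getD i.toNat []).getD j.toNat 0 := by
  simp [getCell, PySem.List.pyGet?_of_nonneg _ hi, PySem.List.pyGet?_of_nonneg _ hj,
        List.getD_eq_getElem?_getD]

theorem length_setCell (v : List (List Int)) (i j : Nat) : (setCell v i j).length = v.length := by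
  induction v generalizing i with
  | nil => rfl
  | cons r rs ih => cases i <;> simp [setCell, ih]

theorem shape_setCell (c : Nat) (v : List (List Int)) (i j : Nat)
    (h : ∀ r ∈ v, r.length = c) : ∀ r ∈ setCell v i j, r.length = c := by
  induction v generalizing i with
  | nil => simp [setCell]
  | cons r rs ih =>
    cases i with
    | zero =>
      intro x hx
      simp only [setCell, List.mem_cons] at hx
      rcases hx with h1 | h2
      · subst h1; simp [h r (by simp)]
      · exact h x (by simp [h2])
    | succ i =>
      intro x hx
      simp only [setCell, List.mem_cons] at hx
      rcases hx with h1 | h2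
      · subst h1; exact h x (by simp)
      · exact ih i (fun r hr => h r (List.mem_cons_of_mem _ hr)) x h2

theorem cntRow_set (r : List Int) (j : Nat) (hj : j < r.length) (h0 : r.getD j 0 = 0) :
    cntRow (r.set j 1) + 1 = cntRow r := by
  induction r generalizing j with
  | nil => simp at hj
  | cons x xs ih =>
    cases j with
    | zero =>
      simp [List.getD] at h0
      simp [cntRow, List.countP_cons, h0]
    | succ j =>
      simp at hj
      simp [List.getD] at h0
      have := ih j hj (by simpa [List.getD] using h0)
      simp [cntRow, List.countP_cons] at this ⊢
      omega

theorem cnt_setCell (v : List (List Int)) (i j : Nat) (hi : i < v.length)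
    (hj : j < (v.getD i []).length) (h0 : (v.getD i []).getD j 0 = 0) :
    cnt (setCell v i j) + 1 = cnt v := by
  induction v generalizing i with
  | nil => simp at hi
  | cons r rs ih =>
    cases i with
    | zero =>
      simp [List.getD] at hj h0
      have := cntRow_set r j hj h0
      simp [setCell, cnt]
      omega
    | succ i =>
      simp at hi
      simp [List.getD] at hj h0
      have := ih i hi (by simpa [List.getD] using hj) (by simpa [List.getD] using h0)
      simp [setCell, cnt] at this ⊢
      omega

-- facts available in the "mark the cell" branch
theorem mark_facts (matrix visited : List (List Int)) (i j : Int)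
    (hS : Shape matrix visited)
    (hb : ¬ (i < 0 ∨ (matrix.length : Int) ≤ i ∨ j < 0 ∨ ((matrix.headI).length : Int) ≤ j))
    (hv : getCell visited i j = 0) :
    Shape matrix (setCell visited i.toNat j.toNat) ∧
    cnt (setCell visited i.toNat j.toNat) + 1 = cnt visited := by
  push_neg at hb
  obtain ⟨hi0, hiR, hj0, hjC⟩ := hb
  have hlen := hS.1
  have hiN : i.toNat < visited.length := by omega
  have hrow : (visited.getD i.toNat []).length = (matrix.headI).length := by
    have : visited.getD i.toNat [] ∈ visited := by
      rw [List.getD_eq_getElem?_getD, List.getElem?_eq_getElem hiN]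
      exact List.getElem_mem _
    exact hS.2 _ this
  have hjN : j.toNat < (visited.getD i.toNat []).length := by
    rw [hrow]; omega
  have h0 : (visited.getD i.toNat []).getD j.toNat 0 = 0 := by
    rw [getCell_nonneg _ _ _ hi0 hj0] at hv; exact hv
  refine ⟨⟨?_, shape_setCell _ _ _ _ hS.2⟩, cnt_setCell _ _ _ hiN hjN h0⟩
  rw [length_setCell]; exact hS.1

theorem aGo_suff (matrix : List (List Int)) :
    ∀ f visited (i j : Int) (d : String), Shape matrix visited → cnt visited < f →
    ∃ s v', aGo matrix f visited i j d = some (s, v') ∧ Shape matrix v' ∧ cnt v' ≤ cnt visited := by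
  intro f
  induction f with
  | zero => intro _ _ _ _ hS h; omega
  | succ f ih =>
    intro visited i j d hS hc
    by_cases hb : i < 0 ∨ (matrix.length : Int) ≤ i ∨ j < 0 ∨ ((matrix.headI).length : Int) ≤ j
    · exact ⟨"", visited, by simp [aGo, hb], hS, le_refl _⟩
    by_cases hz : getCell matrix i j = 0 ∨ getCell visited i j ≠ 0
    · exact ⟨"", visited, by simp only [aGo]; rw [if_neg hb, if_pos hz], hS, le_refl _⟩
    have hv : getCell visited i j = 0 := by push_neg at hz; exact hz.2
    obtain ⟨hS0, hc0⟩ := mark_facts matrix visited i j hS hb hv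
    set v0 := setCell visited i.toNat j.toNat with hv0
    obtain ⟨sD, v1, hD, hS1, hc1⟩ := ih v0 (i+1) j "D" hS0 (by omega)
    obtain ⟨sU, v2, hU, hS2, hc2⟩ := ih v1 (i-1) j "U" hS1 (by omega)
    obtain ⟨sL, v3, hL, hS3, hc3⟩ := ih v2 i (j-1) "L" hS2 (by omega)
    obtain ⟨sR, v4, hR, hS4, hc4⟩ := ih v3 i (j+1) "R" hS3 (by omega)
    refine ⟨d ++ sD ++ sU ++ sL ++ sR, v4, ?_, hS4, by omega⟩
    simp only [aGo]
    rw [if_neg hb, if_neg hz]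
    rw [← hv0]
    simp only [hD, hU, hL, hR]

theorem bGo_mono (matrix : List (List Int)) :
    ∀ f visited stack acc r, bGo matrix f visited stack acc = some r →
    bGo matrix (f+1) visited stack acc = some r := by
  intro f
  induction f with
  | zero =>
    intro visited stack acc r h
    cases stack with
    | nil => simpa [bGo] using h
    | cons c rest => simp [bGo] at h
  | succ f ih =>
    intro visited stack acc r h
    cases stack with
    | nil => simpa [bGo] using h
    | cons c rest =>
      obtain ⟨ci, cj, d⟩ := c
      by_cases hb : ci < 0 ∨ (matrix.length : Int) ≤ ci ∨ cj < 0 ∨ ((matrix.headI).length : Int) ≤ cj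
      · simp only [bGo, if_pos hb] at h ⊢; exact ih _ _ _ _ h
      by_cases hz : getCell matrix ci cj = 0 ∨ getCell visited ci cj ≠ 0
      · simp only [bGo] at h ⊢; rw [if_neg hb, if_pos hz] at h ⊢; exact ih _ _ _ _ h
      · simp only [bGo] at h ⊢; rw [if_neg hb, if_neg hz] at h ⊢; exact ih _ _ _ _ h

theorem bGo_mono_le (matrix : List (List Int)) (f g : Nat) (hfg : f ≤ g) :
    ∀ visited stack acc r, bGo matrix f visited stack acc = some r →
    bGo matrix g visited stack acc = some r := by
  induction g with
  | zero =>
    intro visited stack acc r h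
    have : f = 0 := by omega
    subst this; exact h
  | succ g ih =>
    intro visited stack acc r h
    rcases Nat.lt_or_ge f (g+1) with hlt | hge
    · exact bGo_mono matrix g visited stack acc r (ih (by omega) visited stack acc r h)
    · have : f = g + 1 := by omega
      subst this; exact h

theorem bGo_suff (matrix : List (List Int)) :
    ∀ f visited stack acc, Shape matrix visited → 4 * cnt visited + stack.length ≤ f →
    ∃ r, bGo matrix f visited stack acc = some r := by
  intro f
  induction f with
  | zero =>
    intro visited stack acc hS h
    have : stack = [] := by
      cases stack with
      | nil => rfl
      | cons c rest => simp only [List.length_cons] at h; omega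
    subst this; exact ⟨(acc, visited), by simp [bGo]⟩
  | succ f ih =>
    intro visited stack acc hS h
    cases stack with
    | nil => exact ⟨(acc, visited), by simp [bGo]⟩
    | cons c rest =>
      obtain ⟨ci, cj, d⟩ := c
      by_cases hb : ci < 0 ∨ (matrix.length : Int) ≤ ci ∨ cj < 0 ∨ ((matrix.headI).length : Int) ≤ cj
      · obtain ⟨r, hr⟩ := ih visited rest acc hS (by simp at h ⊢; omega)
        exact ⟨r, by simp only [bGo, if_pos hb]; exact hr⟩
      by_cases hz : getCell matrix ci cj = 0 ∨ getCell visited ci cj ≠ 0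
      · obtain ⟨r, hr⟩ := ih visited rest acc hS (by simp at h ⊢; omega)
        exact ⟨r, by simp only [bGo]; rw [if_neg hb, if_pos hz]; exact hr⟩
      · have hv : getCell visited ci cj = 0 := by push_neg at hz; exact hz.2
        obtain ⟨hS0, hc0⟩ := mark_facts matrix visited ci cj hS hb hv
        obtain ⟨r, hr⟩ := ih (setCell visited ci.toNat cj.toNat)
          ((ci+1, cj, "D") :: (ci-1, cj, "U") :: (ci, cj-1, "L") :: (ci, cj+1, "R") :: rest)
          (acc ++ [d]) hS0 (by simp at h ⊢; omega)
        exact ⟨r, by simp only [bGo]; rw [if_neg hb, if_neg hz]; exact hr⟩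

theorem jn_foldl (l : List String) (x : String) : l.foldl (· ++ ·) x = x ++ jn l := by
  induction l generalizing x with
  | nil => simp [jn]
  | cons a l ih =>
    show l.foldl (· ++ ·) (x ++ a) = x ++ jn (a :: l)
    rw [ih (x ++ a)]
    show x ++ a ++ jn l = x ++ (l.foldl (· ++ ·) ("" ++ a))
    rw [ih ("" ++ a)]
    simp [String.append_assoc]

theorem jn_append (a b : List String) : jn (a ++ b) = jn a ++ jn b := by
  unfold jn
  rw [List.foldl_append, jn_foldl]
  rfl

-- the heart: processing one stack entry in B consumes exactly some fuel n, appends labels ℓ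
-- whose join is A's string for that entry, leaves A's final visited, and then continues with
-- the rest of the stack untouched
theorem sim (matrix : List (List Int)) :
    ∀ f visited (i j : Int) (d s : String) v', aGo matrix f visited i j d = some (s, v') →
    ∃ n ℓ, jn ℓ = s ∧ ∀ m rest acc,
      bGo matrix (n + m) visited ((i, j, d) :: rest) acc = bGo matrix m v' rest (acc ++ ℓ) := by
  intro f
  induction f with
  | zero => intro visited i j d s v' h; simp [aGo] at h
  | succ f ih =>
    intro visited i j d s v' h
    by_cases hb : i < 0 ∨ (matrix.length : Int) ≤ i ∨ j < 0 ∨ ((matrix.headI).length : Int) ≤ j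
    · simp only [aGo, if_pos hb, Option.some.injEq, Prod.mk.injEq] at h
      obtain ⟨hs, hv⟩ := h
      refine ⟨1, [], by simp [jn, hs], ?_⟩
      intro m rest acc
      have : 1 + m = m + 1 := by omega
      rw [this]
      simp only [bGo, if_pos hb]
      simp [hv]
    by_cases hz : getCell matrix i j = 0 ∨ getCell visited i j ≠ 0
    · simp only [aGo] at h
      rw [if_neg hb, if_pos hz] at h
      simp only [Option.some.injEq, Prod.mk.injEq] at h
      obtain ⟨hs, hv⟩ := h
      refine ⟨1, [], by simp [jn, hs], ?_⟩
      intro m rest acc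
      have : 1 + m = m + 1 := by omega
      rw [this]
      simp only [bGo]
      rw [if_neg hb, if_pos hz]
      simp [hv]
    · simp only [aGo] at h
      rw [if_neg hb, if_neg hz] at h
      set v0 := setCell visited i.toNat j.toNat with hv0
      rcases hD : aGo matrix f v0 (i+1) j "D" with _ | ⟨sD, v1⟩
      · simp [hD] at h
      simp only [hD] at h
      rcases hU : aGo matrix f v1 (i-1) j "U" with _ | ⟨sU, v2⟩
      · simp [hU] at h
      simp only [hU] at h
      rcases hL : aGo matrix f v2 i (j-1) "L" with _ | ⟨sL, v3⟩
      · simp [hL] at h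
      simp only [hL] at h
      rcases hR : aGo matrix f v3 i (j+1) "R" with _ | ⟨sR, v4⟩
      · simp [hR] at h
      simp only [hR] at h
      simp only [Option.some.injEq, Prod.mk.injEq] at h
      obtain ⟨hs, hv⟩ := h
      obtain ⟨nD, lD, hjD, hbD⟩ := ih v0 (i+1) j "D" sD v1 hD
      obtain ⟨nU, lU, hjU, hbU⟩ := ih v1 (i-1) j "U" sU v2 hU
      obtain ⟨nL, lL, hjL, hbL⟩ := ih v2 i (j-1) "L" sL v3 hL
      obtain ⟨nR, lR, hjR, hbR⟩ := ih v3 i (j+1) "R" sR v4 hR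
      refine ⟨nD + nU + nL + nR + 1, [d] ++ lD ++ lU ++ lL ++ lR, ?_, ?_⟩
      · rw [← hs]
        simp only [jn_append, hjD, hjU, hjL, hjR]
        show jn [d] ++ sD ++ sU ++ sL ++ sR = d ++ sD ++ sU ++ sL ++ sR
        simp [jn]
      · intro m rest acc
        have harith : nD + nU + nL + nR + 1 + m = (nD + (nU + (nL + (nR + m)))) + 1 := by omega
        rw [harith]
        simp only [bGo]
        rw [if_neg hb, if_neg hz, ← hv0]
        rw [hbD, hbU, hbL, hbR, hv]
        simp

-- ===== VERDICT (by name: the statement is the Claim_ definition above) =====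
theorem get_island_traversal_path_spec : Claim_equal_get_island_traversal_path := by
  unfold Claim_equal_get_island_traversal_path
  intro matrix visited i j direction _ hPre
  unfold Spec_get_island_traversal_path
  obtain ⟨-, hPre⟩ := hPre
  rcases hPre with hb | hstop | ⟨-, hlen, hrows, -⟩
  · -- out-of-bounds start: both DFSs stop immediately
    have hA : aGo matrix (cnt visited + 1) visited i j direction = some ("", visited) := by
      simp only [aGo]; rw [if_pos hb]
    have hB : bGo matrix (4 * cnt visited + 1) visited [(i, j, direction)] [] = some ([], visited) := by
      simp only [bGo]; rw [if_pos hb]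
    unfold get_island_traversal_path get_island_traversal_path_alt
    rw [hA, hB]; simp [jn]
  · -- start cell is water or already visited: both DFSs stop immediately
    obtain ⟨hi0, hiR, hj0, hjC, hjm, hcell⟩ := hstop
    have hb : ¬(i < 0 ∨ (matrix.length : Int) ≤ i ∨ j < 0 ∨ ((matrix.headI).length : Int) ≤ j) := by
      push_neg; exact ⟨hi0, hiR, hj0, hjC⟩
    have hz : getCell matrix i j = 0 ∨ getCell visited i j ≠ 0 := by
      rcases hcell with h0 | ⟨_, _, hv⟩
      · left; rw [getCell_nonneg _ _ _ hi0 hj0]; exact h0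
      · right; rw [getCell_nonneg _ _ _ hi0 hj0]; exact hv
    have hA : aGo matrix (cnt visited + 1) visited i j direction = some ("", visited) := by
      simp only [aGo]; rw [if_neg hb, if_pos hz]
    have hB : bGo matrix (4 * cnt visited + 1) visited [(i, j, direction)] [] = some ([], visited) := by
      simp only [bGo]; rw [if_neg hb, if_pos hz]
    unfold get_island_traversal_path get_island_traversal_path_alt
    rw [hA, hB]; simp [jn]
  · -- rectangular matrix with same-shaped boolean mask: the general simulation argument
    have hS : Shape matrix visited := ⟨hlen, hrows⟩
    obtain ⟨s, v', hA, _, _⟩ :=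
      aGo_suff matrix (cnt visited + 1) visited i j direction hS (by omega)
    obtain ⟨n, ℓ, hjn, hb⟩ := sim matrix (cnt visited + 1) visited i j direction s v' hA
    have h1 : bGo matrix (n + 0) visited [(i, j, direction)] [] = some (ℓ, v') := by
      rw [hb 0 [] []]; simp [bGo]
    obtain ⟨r, hr⟩ :=
      bGo_suff matrix (4 * cnt visited + 1) visited [(i, j, direction)] [] hS (by simp)
    have hN1 : bGo matrix (max (n + 0) (4 * cnt visited + 1)) visited [(i, j, direction)] [] = some (ℓ, v') :=
      bGo_mono_le matrix _ _ (Nat.le_max_left _ _) _ _ _ _ h1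
    have hN2 : bGo matrix (max (n + 0) (4 * cnt visited + 1)) visited [(i, j, direction)] [] = some r :=
      bGo_mono_le matrix _ _ (Nat.le_max_right _ _) _ _ _ _ hr
    have hrl : r = (ℓ, v') := by rw [hN1] at hN2; exact (Option.some.injEq _ _ ▸ hN2).symm
    unfold get_island_traversal_path get_island_traversal_path_alt
    rw [hA, hr, hrl]
    simpa using hjn.symm
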